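-- pv_equiv track=rewrite | github.com/Aryankakade/backend | updated_backend.py | extract_learning_points
-- ===== SOURCE A (Python) =====
-- def extract_learning_points(user_input: str, bot_response: str) -> str:
--     """Extract learning points from conversation"""
--     learning_keywords = [
--         "my name is", "i am", "i work", "i like", "i don't like",
--         "my preference", "remember that", "important", "my goal",
--         "my project", "my problem", "i need help with", "my role",
--         "my company", "my experience", "my skills", "career goal",
--         "i live in", "my location", "my city", "my country",
--         "i prefer", "i want", "i need", "i use", "my favorite"
--     ]
--
--     learned = []
--     user_lower = user_input.lower()
--
--     for keyword in learning_keywords: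
--         if keyword in user_lower:
--             sentences = user_input.split('.')
--             for sentence in sentences:
--                 if keyword in sentence.lower():
--                     learned.append(sentence.strip())
--
--     return "; ".join(learned)
-- ===== SOURCE B (Python) =====
-- def extract_learning_points(user_input: str, bot_response: str) -> str:
--     """Extract learning points from conversation"""
--     learning_keywords = [
--         "my name is", "i am", "i work", "i like", "i don't like",
--         "my preference", "remember that", "important", "my goal",
--         "my project", "my problem", "i need help with", "my role",
--         "my company", "my experience", "my skills", "career goal",
--         "i live in", "my location", "my city", "my country",
--         "i prefer", "i want", "i need", "i use", "my favorite"
--     ]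
--
--     # Split and lower/strip each sentence once; one sentence-major pass
--     # groups matches per keyword; emit keyword-major to keep A's output order.
--     sentences = user_input.split('.')
--     hits = {keyword: [] for keyword in learning_keywords}
--     for sentence in sentences:
--         low = sentence.lower()
--         stripped = sentence.strip()
--         for keyword in learning_keywords:
--             if keyword in low:
--                 hits[keyword].append(stripped)
--     return "; ".join(s for keyword in learning_keywords for s in hits[keyword])
-- ===== Notes on version B (the rewrite author's own statement) =====
-- stated objective: alternative
-- what changed: B splits user_input into sentences once and lowers/strips each sentence once, grouping matching sentences per keyword in a dict built in a single sentence-major pass and emitting keyword-major, whereas A re-splits the input and re-lowers every sentence inside each matching keyword's iteration behind a whole-string guard; it trades A's per-keyword rescanning for one grouping pass plus a dict emit.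
import Mathlib
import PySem

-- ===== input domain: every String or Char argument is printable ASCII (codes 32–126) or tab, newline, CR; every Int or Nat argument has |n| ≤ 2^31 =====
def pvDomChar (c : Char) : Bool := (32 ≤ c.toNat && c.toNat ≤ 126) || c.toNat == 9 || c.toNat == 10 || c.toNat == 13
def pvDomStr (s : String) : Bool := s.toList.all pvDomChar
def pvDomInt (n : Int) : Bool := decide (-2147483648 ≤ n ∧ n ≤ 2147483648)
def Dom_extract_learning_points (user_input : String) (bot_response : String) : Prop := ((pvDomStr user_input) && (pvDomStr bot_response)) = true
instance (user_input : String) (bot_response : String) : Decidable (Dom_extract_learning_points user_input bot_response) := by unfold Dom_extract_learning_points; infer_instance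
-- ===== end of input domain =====

-- B splits, lowers and strips each sentence once and groups matches per keyword
-- in a dict built in a single sentence-major pass, emitting keyword-major
-- (objective: alternative — one grouping pass instead of per-keyword rescans).


-- ===== PORT A =====
-- the shared constant list of keywords (data, used verbatim by both Pythons)
def learning_keywords : List String :=
  ["my name is", "i am", "i work", "i like", "i don't like",
   "my preference", "remember that", "important", "my goal",
   "my project", "my problem", "i need help with", "my role",
   "my company", "my experience", "my skills", "career goal",
   "i live in", "my location", "my city", "my country",
   "i prefer", "i want", "i need", "i use", "my favorite"]

-- s.split(sep) for nonempty sep (Str.split? is none only for sep = "")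
def pySplit (s sep : String) : List String := (PySem.Str.split? s sep).getD []

def extract_learning_points (user_input : String) (bot_response : String) : String :=
  let user_lower := PySem.Str.lower user_input
  let learned : List String := learning_keywords.foldl (fun learned keyword =>
    if PySem.Str.isIn keyword user_lower then
      let sentences := pySplit user_input "."
      sentences.foldl (fun learned sentence =>
        if PySem.Str.isIn keyword (PySem.Str.lower sentence) then
          learned ++ [PySem.Str.strip sentence]
        else learned) learned
    else learned) []
  PySem.Str.join "; " learned

-- ===== PORT B =====
def extract_learning_points_alt (user_input : String) (bot_response : String) : String :=
  let sentences := pySplit user_input "."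
  let hits0 : PySem.Dict String (List String) :=
    learning_keywords.foldl (fun d keyword => d.insert keyword []) PySem.Dict.empty
  let hits := sentences.foldl (fun d sentence =>
    let low := PySem.Str.lower sentence
    let stripped := PySem.Str.strip sentence
    learning_keywords.foldl (fun d keyword =>
      if PySem.Str.isIn keyword low then d.modify keyword [] (· ++ [stripped]) else d) d) hits0
  PySem.Str.join "; " (learning_keywords.flatMap (fun keyword => hits.getD keyword []))

-- ===== PRECONDITION & SPEC =====
def Spec_extract_learning_points (user_input : String) (bot_response : String) (out : String) : Prop := out = extract_learning_points_alt user_input bot_response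
instance (user_input : String) (bot_response : String) (out : String) : Decidable (Spec_extract_learning_points user_input bot_response out) := by unfold Spec_extract_learning_points; infer_instance

-- ===== CLAIM (what is proved, stated in full; the proofs are below) =====
def Claim_equal_extract_learning_points : Prop := ∀ (user_input : String) (bot_response : String), Dom_extract_learning_points user_input bot_response → Spec_extract_learning_points user_input bot_response (extract_learning_points user_input bot_response)

-- ===== LEMMAS AND PROOFS =====

-- every piece produced by splitOn is an infix of the input
theorem go_infix (sep : List Char) (fuel : Nat) :
    ∀ (l cur : List Char) (acc : List (List Char)) (s : List Char),
      cur.reverse ++ l <:+: s → (∀ p ∈ acc, p <:+: s) →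
      ∀ p ∈ PySem.Chars.splitOn.go sep fuel l cur acc, p <:+: s := by
  induction fuel with
  | zero =>
    intro l cur acc s h1 h2 p hp
    simp [PySem.Chars.splitOn.go] at hp
    rcases hp with hp | hp
    · exact h2 p hp
    · exact hp ▸ h1
  | succ fuel ih =>
    intro l cur acc s h1 h2 p hp
    cases l with
    | nil =>
      simp [PySem.Chars.splitOn.go] at hp
      rcases hp with hp | hp
      · exact h2 p hp
      · subst hp
        simpa using h1
    | cons c rest =>
      rw [PySem.Chars.splitOn.go] at hp
      split at hp
      · refine ih _ _ _ s ?_ ?_ p hp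
        · simp only [List.reverse_nil, List.nil_append]
          exact List.IsInfix.trans (List.drop_suffix _ _).isInfix
            (List.IsInfix.trans (List.suffix_append cur.reverse (c :: rest)).isInfix h1)
        · intro q hq
          rcases List.mem_cons.mp hq with hq | hq
          · exact hq ▸ List.IsInfix.trans (List.prefix_append cur.reverse (c :: rest)).isInfix h1
          · exact h2 q hq
      · refine ih _ _ _ s ?_ h2 p hp
        simpa using h1

theorem mem_splitOn_infix (s sep p : List Char) (hp : p ∈ PySem.Chars.splitOn s sep) : p <:+: s := by
  refine go_infix sep (s.length + 1) s [] [] s (by simp) (by simp) p hp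

-- pieces of pySplit u "." are infixes of u (on char lists)
theorem mem_pySplit_infix (u p : String) (hp : p ∈ pySplit u ".") :
    p.toList <:+: u.toList := by
  have h := PySem.Str.split?_map u "."
  unfold pySplit at hp
  cases hsp : PySem.Str.split? u "." with
  | none => simp [hsp] at hp
  | some l =>
    rw [hsp] at h hp
    simp only [Option.map_some, PySem.Chars.split?, List.isEmpty_iff] at h
    rw [if_neg (by decide)] at h
    have hl : l.map String.toList = PySem.Chars.splitOn u.toList ".".toList :=
      Option.some.inj h
    have : p.toList ∈ PySem.Chars.splitOn u.toList ".".toList := by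
      rw [← hl]; exact List.mem_map_of_mem hp
    simpa using mem_splitOn_infix u.toList ".".toList p.toList this

-- guard redundancy: keyword absent from lower(u) → absent from every piece
theorem guard_empty (u k s : String) (hs : s ∈ pySplit u ".")
    (hk : PySem.Str.isIn k (PySem.Str.lower u) = false) :
    PySem.Str.isIn k (PySem.Str.lower s) = false := by
  have h2 : PySem.Chars.lower s.toList <:+: PySem.Chars.lower u.toList := by
    unfold PySem.Chars.lower
    exact (mem_pySplit_infix u s hs).map _
  cases hb : PySem.Str.isIn k (PySem.Str.lower s) with
  | false => rfl
  | true =>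
    have h1 := (PySem.Str.isIn_iff_infix _ _).mp hb
    rw [PySem.Str.toList_lower] at h1
    have ht : PySem.Str.isIn k (PySem.Str.lower u) = true := by
      rw [PySem.Str.isIn_iff_infix, PySem.Str.toList_lower]
      exact h1.trans h2
    rw [ht] at hk; cases hk

-- getD over the initializer dict is []
theorem getD_init (kws : List String) (d : PySem.Dict String (List String))
    (h : ∀ q, d.getD q [] = []) (q : String) :
    (kws.foldl (fun d k => d.insert k []) d).getD q [] = [] := by
  induction kws generalizing d with
  | nil => exact h q
  | cons k rest ih =>
    refine ih _ (fun q' => ?_)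
    rw [PySem.Dict.getD_insert]
    split <;> simp [h]

-- the inner keyword loop appends [st] exactly at the matching keys
theorem inner_loop (c : String → Bool) (st : String) (kws : List String) (hnd : kws.Nodup) :
    ∀ (d : PySem.Dict String (List String)) (q : String),
      (kws.foldl (fun d k => if c k then d.modify k [] (· ++ [st]) else d) d).getD q []
        = d.getD q [] ++ (if q ∈ kws ∧ c q then [st] else []) := by
  induction kws with
  | nil => simp
  | cons k rest ih =>
    intro d q
    have hk : k ∉ rest := (List.nodup_cons.mp hnd).1
    have hrest := (List.nodup_cons.mp hnd).2
    simp only [List.foldl_cons]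
    rw [ih hrest]
    by_cases hqk : q = k
    · subst hqk
      by_cases hc : c q <;> simp [hc, hk]
    · have hmem : q ∈ k :: rest ↔ q ∈ rest := by simp [List.mem_cons, hqk]
      by_cases hck : c k
      · rw [if_pos hck, PySem.Dict.getD_modify, if_neg hqk]
        simp only [hmem]
      · rw [if_neg hck]
        simp only [hmem]

-- the outer sentence loop groups per keyword
theorem outer_loop (kws : List String) (hnd : kws.Nodup) (ss : List String) :
    ∀ (d : PySem.Dict String (List String)) (q : String), q ∈ kws →
      (ss.foldl (fun d sentence =>
          kws.foldl (fun d k =>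
            if PySem.Str.isIn k (PySem.Str.lower sentence) then
              d.modify k [] (· ++ [PySem.Str.strip sentence]) else d) d) d).getD q []
        = d.getD q [] ++
            (ss.filter (fun sentence => PySem.Str.isIn q (PySem.Str.lower sentence))).map PySem.Str.strip := by
  induction ss with
  | nil => simp
  | cons s rest ih =>
    intro d q hq
    simp only [List.foldl_cons]
    rw [ih _ q hq, inner_loop _ _ kws hnd]
    by_cases hc : PySem.Str.isIn q (PySem.Str.lower s) = true
    · have hc2 : PySem.Chars.isIn q.toList (PySem.Chars.lower s.toList) = true := by
        simpa using hc
      simp [hq, hc2]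
    · have hc0 : PySem.Str.isIn q (PySem.Str.lower s) = false := by
        cases hb : PySem.Str.isIn q (PySem.Str.lower s) <;> simp_all
      have hc2 : PySem.Chars.isIn q.toList (PySem.Chars.lower s.toList) = false := by
        simpa using hc0
      simp [hc2]

theorem kws_nodup : learning_keywords.Nodup := by decide

-- the two learned-lists agree
theorem main_eq (u : String) :
    (learning_keywords.foldl (fun learned keyword =>
        if PySem.Str.isIn keyword (PySem.Str.lower u) then
          (pySplit u ".").foldl (fun learned sentence =>
            if PySem.Str.isIn keyword (PySem.Str.lower sentence) then
              learned ++ [PySem.Str.strip sentence] else learned) learned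
        else learned) [])
    = learning_keywords.flatMap (fun keyword =>
        ((pySplit u ".").foldl (fun d sentence =>
            learning_keywords.foldl (fun d k =>
              if PySem.Str.isIn k (PySem.Str.lower sentence) then
                d.modify k [] (· ++ [PySem.Str.strip sentence]) else d) d)
          (learning_keywords.foldl (fun d k => d.insert k []) PySem.Dict.empty)).getD keyword []) := by
  have hhits : ∀ k ∈ learning_keywords,
      ((pySplit u ".").foldl (fun d sentence =>
          learning_keywords.foldl (fun d k =>
            if PySem.Str.isIn k (PySem.Str.lower sentence) then
              d.modify k [] (· ++ [PySem.Str.strip sentence]) else d) d)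
        (learning_keywords.foldl (fun d k => d.insert k []) PySem.Dict.empty)).getD k []
      = ((pySplit u ".").filter (fun s => PySem.Str.isIn k (PySem.Str.lower s))).map PySem.Str.strip := by
    intro k hk
    rw [outer_loop learning_keywords kws_nodup (pySplit u ".") _ k hk,
        getD_init learning_keywords PySem.Dict.empty (fun q => rfl) k]
    simp
  have hA : List.foldl (fun learned keyword =>
        if PySem.Str.isIn keyword (PySem.Str.lower u) then
          (pySplit u ".").foldl (fun learned sentence =>
            if PySem.Str.isIn keyword (PySem.Str.lower sentence) then
              learned ++ [PySem.Str.strip sentence] else learned) learned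
        else learned) [] learning_keywords
      = List.foldl (fun acc keyword => acc ++
          (if PySem.Str.isIn keyword (PySem.Str.lower u) then
            ((pySplit u ".").filter (fun s => PySem.Str.isIn keyword (PySem.Str.lower s))).map PySem.Str.strip
          else [])) [] learning_keywords := by
    refine PySem.List.foldl_congr_mem _ _ _ _ (fun acc k _ => ?_)
    by_cases h : PySem.Str.isIn k (PySem.Str.lower u) = true
    · rw [if_pos h, if_pos h,
        PySem.List.foldl_append_if (fun s => PySem.Str.isIn k (PySem.Str.lower s)) PySem.Str.strip]
    · rw [if_neg h, if_neg h, List.append_nil]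
  rw [hA, PySem.List.foldl_append_eq_flatMap, List.nil_append]
  refine List.flatMap_congr (fun k hk => ?_)
  rw [hhits k hk]
  by_cases h : PySem.Str.isIn k (PySem.Str.lower u) = true
  · rw [if_pos h]
  · rw [if_neg h]
    have hf : (pySplit u ".").filter (fun s => PySem.Str.isIn k (PySem.Str.lower s)) = [] := by
      rw [List.filter_eq_nil_iff]
      intro s hs
      have := guard_empty u k s hs (by cases hb : PySem.Str.isIn k (PySem.Str.lower u) <;> simp_all)
      simpa using this
    rw [hf, List.map_nil]

-- ===== VERDICT (by name: the statement is the Claim_ definition above) =====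
theorem extract_learning_points_spec : Claim_equal_extract_learning_points := by
  intro user_input bot_response _
  show PySem.Str.join "; " _ = PySem.Str.join "; " _
  exact congrArg (PySem.Str.join "; ") (main_eq user_input)
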